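-- pv_equiv track=rewrite | github.com/planetlab/sfa | util/pl_to_geni.py | hrn_to_loginbase
-- ===== SOURCE A (Python) =====
-- def hrn_to_loginbase(hrn, algorithm=0):
--     hrn_arr = hrn.split('.')
--     j = len(hrn_arr)-2
--     alg_count = algorithm-1
--     login_base = hrn_arr[len(hrn_arr)-1]
--     while j>=0 and alg_count>=0:
--         if alg_count == 0:
--             login_base = login_base+hrn_arr[j]
--         j = j-1
--         alg_count = alg_count-1
--     if len(login_base) > 20:
--         return login_base[0:20]
--     else:
--         return login_base
-- ===== SOURCE B (Python) =====
-- def hrn_to_loginbase(hrn, algorithm=0):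
--     parts = hrn.split('.')
--     n = len(parts)
--     login_base = parts[-1]
--     if 1 <= algorithm <= n - 1:
--         login_base += parts[n - 1 - algorithm]
--     return login_base[:20]
-- ===== Notes on version B (the rewrite author's own statement) =====
-- stated objective: simpler
-- what changed: The countdown while-loop (which appends at most one component) is replaced by its closed form: a single conditional concatenation of parts[n-1-algorithm] when 1 <= algorithm <= n-1, followed by an unconditional [:20] truncation.
import Mathlib
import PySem

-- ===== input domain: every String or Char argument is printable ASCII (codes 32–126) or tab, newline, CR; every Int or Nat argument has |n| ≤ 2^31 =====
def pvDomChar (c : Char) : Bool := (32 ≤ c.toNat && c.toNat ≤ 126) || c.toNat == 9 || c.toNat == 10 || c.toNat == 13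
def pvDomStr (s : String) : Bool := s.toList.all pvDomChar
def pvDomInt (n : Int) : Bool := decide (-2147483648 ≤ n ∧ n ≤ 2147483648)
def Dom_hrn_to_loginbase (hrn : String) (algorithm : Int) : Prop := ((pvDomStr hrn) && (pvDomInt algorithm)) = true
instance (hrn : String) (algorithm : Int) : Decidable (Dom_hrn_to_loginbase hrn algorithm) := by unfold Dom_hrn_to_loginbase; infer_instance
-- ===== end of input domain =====

-- B replaces A's countdown while-loop by its closed form (one conditional concatenation); objective: simpler.

-- ===== PORT A =====
-- the while-loop of A: while j>=0 and alg_count>=0: if alg_count==0: login_base += hrn_arr[j]; j -= 1; alg_count -= 1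
def hrnLoopA (parts : List String) (j alg_count : Int) (login_base : String) : String :=
  if _h : 0 ≤ j ∧ 0 ≤ alg_count then
    hrnLoopA parts (j - 1) (alg_count - 1)
      (if alg_count = 0 then login_base ++ PySem.List.pyGetD parts j "" else login_base)
  else
    login_base
termination_by (j + 1).toNat
decreasing_by omega

def hrn_to_loginbase (hrn : String) (algorithm : Int) : String :=
  let hrn_arr := (PySem.Str.split? hrn ".").getD []
  let j : Int := (hrn_arr.length : Int) - 2
  let alg_count : Int := algorithm - 1
  let login_base := PySem.List.pyGetD hrn_arr ((hrn_arr.length : Int) - 1) ""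
  let login_base := hrnLoopA hrn_arr j alg_count login_base
  if 20 < PySem.Str.len login_base then
    PySem.Str.slice login_base (some 0) (some 20)
  else
    login_base

-- ===== PORT B =====
def hrn_to_loginbase_alt (hrn : String) (algorithm : Int) : String :=
  let parts := (PySem.Str.split? hrn ".").getD []
  let n : Int := (parts.length : Int)
  let login_base := PySem.List.pyGetD parts (-1) ""
  let login_base :=
    if 1 ≤ algorithm ∧ algorithm ≤ n - 1 then
      login_base ++ PySem.List.pyGetD parts (n - 1 - algorithm) ""
    else
      login_base
  PySem.Str.slice login_base none (some 20)

-- ===== PRECONDITION & SPEC =====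
def Spec_hrn_to_loginbase (hrn : String) (algorithm : Int) (out : String) : Prop := out = hrn_to_loginbase_alt hrn algorithm
instance (hrn : String) (algorithm : Int) (out : String) : Decidable (Spec_hrn_to_loginbase hrn algorithm out) := by unfold Spec_hrn_to_loginbase; infer_instance

-- ===== CLAIM (what is proved, stated in full; the proofs are below) =====
def Claim_equal_hrn_to_loginbase : Prop := ∀ (hrn : String) (algorithm : Int), Dom_hrn_to_loginbase hrn algorithm → Spec_hrn_to_loginbase hrn algorithm (hrn_to_loginbase hrn algorithm)

-- ===== LEMMAS AND PROOFS =====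

theorem splitOn_go_ne_nil (sep : List Char) (fuel : Nat) (s acc : List Char) (res : List (List Char)) :
    PySem.Chars.splitOn.go sep fuel s acc res ≠ [] := by
  induction fuel generalizing s acc res with
  | zero => simp [PySem.Chars.splitOn.go]
  | succ n ih =>
    cases s with
    | nil => simp [PySem.Chars.splitOn.go]
    | cons c rest =>
      rw [PySem.Chars.splitOn.go.eq_def]
      by_cases hp : sep.isPrefixOf (c :: rest) = true <;> simp [hp] <;> apply ih

theorem split_dot_ne_nil (hrn : String) : (PySem.Str.split? hrn ".").getD [] ≠ [] := by
  simp [PySem.Str.split?, PySem.Chars.split?]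
  intro h
  exact absurd h (by
    intro hh
    exact splitOn_go_ne_nil _ _ _ _ _ (by simpa [PySem.Chars.splitOn] using hh))

theorem hrnLoopA_eq (parts : List String) (fuel : Nat) :
    ∀ (j ac : Int) (lb : String), (j + 1).toNat ≤ fuel →
      hrnLoopA parts j ac lb =
        if 0 ≤ ac ∧ ac ≤ j then lb ++ PySem.List.pyGetD parts (j - ac) "" else lb := by
  induction fuel with
  | zero =>
    intro j ac lb hf
    rw [hrnLoopA]
    have hj : ¬ (0 ≤ j) := by omega
    rw [dif_neg (by omega), if_neg (by omega)]
  | succ n ih =>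
    intro j ac lb hf
    rw [hrnLoopA]
    by_cases h : 0 ≤ j ∧ 0 ≤ ac
    · rw [dif_pos h, ih (j - 1) (ac - 1) _ (by omega)]
      by_cases hz : ac = 0
      · subst hz
        rw [if_neg (by omega), if_pos (by omega), if_pos (by omega)]
        simp
      · rw [if_neg hz]
        by_cases hle : ac ≤ j
        · rw [if_pos (by omega), if_pos (by omega),
            show j - 1 - (ac - 1) = j - ac by omega]
        · rw [if_neg (by omega), if_neg (by omega)]
    · rw [dif_neg h, if_neg (by omega)]

theorem pyGetD_last (parts : List String) (h : parts ≠ []) :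
    PySem.List.pyGetD parts (-1) "" = PySem.List.pyGetD parts ((parts.length : Int) - 1) "" := by
  have hlen : 0 < parts.length := List.length_pos_iff.mpr h
  have h2 : PySem.List.pyGetD parts ((parts.length : Int) - 1) "" =
      parts[((parts.length : Int) - 1).toNat] :=
    PySem.List.pyGetD_eq_getElem parts "" (by omega) (by omega)
  rw [PySem.List.pyGetD_neg_ofNat parts 1 "" (by omega) (by omega), h2]
  congr 1
  omega

theorem trunc_eq (s : String) :
    (if 20 < PySem.Str.len s then PySem.Str.slice s (some 0) (some 20) else s) =
      PySem.Str.slice s none (some 20) := by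
  by_cases h : 20 < PySem.Str.len s
  · rw [if_pos h]
    apply String.toList_inj.mp
    simp [PySem.Str.toList_slice]
  · rw [if_neg h]
    apply String.toList_inj.mp
    rw [PySem.Str.toList_slice, PySem.Chars.slice_eq_listSlice,
      show (20 : Int) = ((20 : Nat) : Int) from rfl, PySem.List.slice_to_natCast,
      List.take_of_length_le (by simpa [PySem.Str.len_eq] using h)]

-- ===== VERDICT (by name: the statement is the Claim_ definition above) =====
theorem hrn_to_loginbase_spec : Claim_equal_hrn_to_loginbase := by
  intro hrn algorithm _
  unfold Spec_hrn_to_loginbase hrn_to_loginbase hrn_to_loginbase_alt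
  dsimp only
  set parts := (PySem.Str.split? hrn ".").getD [] with hparts
  have hne : parts ≠ [] := split_dot_ne_nil hrn
  rw [hrnLoopA_eq parts ((parts.length : Int) - 2 + 1).toNat _ _ _ (le_refl _),
    trunc_eq, pyGetD_last parts hne]
  by_cases h : 1 ≤ algorithm ∧ algorithm ≤ (parts.length : Int) - 1
  · rw [if_pos (show 0 ≤ algorithm - 1 ∧ algorithm - 1 ≤ (parts.length : Int) - 2 by omega),
      if_pos h,
      show (parts.length : Int) - 2 - (algorithm - 1) = (parts.length : Int) - 1 - algorithm by omega]
  · rw [if_neg (by omega), if_neg h]
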